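-- pv_equiv track=rewrite | github.com/deploysquad-ai/recon | recon-core/src/deploysquad_recon_core/vault/reader.py | parse_body_sections
-- ===== SOURCE A (Python) =====
-- def parse_body_sections(body: str) -> dict[str, str]:
--     """Split body on ## headings into {heading: content} dict.
--
--     Example:
--         '## Description\\nFoo bar\\n\\n## Scope\\nBaz'
--         -> {'Description': 'Foo bar', 'Scope': 'Baz'}
--     """
--     sections: dict[str, str] = {}
--     current_heading: str | None = None
--     current_lines: list[str] = []
--
--     for line in body.split("\n"):
--         if line.startswith("## "):
--             if current_heading is not None:
--                 sections[current_heading] = "\n".join(current_lines).strip()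
--             current_heading = line[3:].strip()
--             current_lines = []
--         else:
--             current_lines.append(line)
--
--     if current_heading is not None:
--         sections[current_heading] = "\n".join(current_lines).strip()
--
--     return sections
-- ===== SOURCE B (Python) =====
-- def parse_body_sections(body: str) -> dict[str, str]:
--     """Split body on ## headings into {heading: content} dict."""
--
--     def blocks(lines):
--         while lines:
--             line, lines = lines[0], lines[1:]
--             if line.startswith("## "):
--                 k = 0
--                 while k < len(lines) and not lines[k].startswith("## "):
--                     k += 1
--                 yield line[3:].strip(), "\n".join(lines[:k]).strip()
--                 lines = lines[k:]
--
--     return dict(blocks(body.split("\n")))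
-- ===== Notes on version B (the rewrite author's own statement) =====
-- stated objective: idiomatic
-- what changed: B scans the body block-at-a-time: a generator finds each '## ' heading, takes the whole slice of lines up to the next heading as its content, yields (heading, content) pairs and builds the dict in one dict() call, instead of A's line-by-line fold carrying a current-heading/current-lines accumulator with an end-of-loop flush.
import Mathlib
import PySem

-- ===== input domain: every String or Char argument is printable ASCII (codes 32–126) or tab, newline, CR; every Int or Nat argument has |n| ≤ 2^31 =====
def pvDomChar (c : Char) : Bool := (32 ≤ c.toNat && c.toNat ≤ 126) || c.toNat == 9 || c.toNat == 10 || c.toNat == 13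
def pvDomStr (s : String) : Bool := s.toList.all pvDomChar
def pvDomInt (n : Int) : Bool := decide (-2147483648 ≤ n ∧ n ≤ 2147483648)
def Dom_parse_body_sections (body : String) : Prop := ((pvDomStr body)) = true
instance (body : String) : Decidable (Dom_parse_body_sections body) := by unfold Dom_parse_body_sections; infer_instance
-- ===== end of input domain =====

-- B replaces A's line-by-line accumulator with a block-at-a-time scan that yields
-- (heading, slice) pairs and builds the dict in one go (objective: idiomatic).

-- shared string helpers (the identical Python subexpressions of both programs)
def pvIsHead (l : String) : Bool := PySem.Str.startswith l "## "
def pvTitle (l : String) : String := PySem.Str.strip (PySem.Str.slice l (some 3) none)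
def pvJoinStrip (ls : List String) : String := PySem.Str.strip (PySem.Str.join "\n" ls)
def pvLines (body : String) : List String := (PySem.Str.split? body "\n").getD []

-- ===== PORT A =====
def pvStepA (st : PySem.Dict String String × Option String × List String) (line : String) :
    PySem.Dict String String × Option String × List String :=
  if pvIsHead line then
    ((match st.2.1 with
      | some h => st.1.insert h (pvJoinStrip st.2.2)
      | none => st.1),
     some (pvTitle line), [])
  else (st.1, st.2.1, st.2.2 ++ [line])

def pvFlushA (st : PySem.Dict String String × Option String × List String) :
    PySem.Dict String String :=
  match st.2.1 with
  | some h => st.1.insert h (pvJoinStrip st.2.2)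
  | none => st.1

def parse_body_sections (body : String) : List (String × String) :=
  (pvFlushA ((pvLines body).foldl pvStepA (PySem.Dict.empty, none, []))).items

-- ===== PORT B =====
def pvBlocks : List String → List (String × String)
  | [] => []
  | l :: rest =>
    if pvIsHead l then
      (pvTitle l, pvJoinStrip (rest.takeWhile (fun x => !pvIsHead x)))
        :: pvBlocks (rest.dropWhile (fun x => !pvIsHead x))
    else pvBlocks rest
termination_by ls => ls.length
decreasing_by
  · exact Nat.lt_succ_of_le (List.length_dropWhile_le _ _)
  · simp

def parse_body_sections_alt (body : String) : List (String × String) :=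
  (PySem.Dict.ofList (pvBlocks (pvLines body))).items

-- ===== PRECONDITION & SPEC =====
def Spec_parse_body_sections (body : String) (out : List (String × String)) : Prop := out = parse_body_sections_alt body
instance (body : String) (out : List (String × String)) : Decidable (Spec_parse_body_sections body out) := by unfold Spec_parse_body_sections; infer_instance

-- ===== CLAIM (what is proved, stated in full; the proofs are below) =====
def Claim_equal_parse_body_sections : Prop := ∀ (body : String), Dom_parse_body_sections body → Spec_parse_body_sections body (parse_body_sections body)

-- ===== LEMMAS AND PROOFS =====

-- A's fold in the "inside a section" state flushes pairs exactly as B's block scan produces them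
lemma pvFlush_foldl_some (lines : List String) (d : PySem.Dict String String)
    (h : String) (acc : List String) :
    pvFlushA (lines.foldl pvStepA (d, some h, acc)) =
      d.update ((h, pvJoinStrip (acc ++ lines.takeWhile (fun x => !pvIsHead x)))
                  :: pvBlocks (lines.dropWhile (fun x => !pvIsHead x))) := by
  induction lines generalizing d h acc with
  | nil => simp [pvFlushA, pvBlocks, PySem.Dict.update]
  | cons l rest ih =>
    by_cases hl : pvIsHead l = true
    · simp only [List.foldl_cons, pvStepA, hl, if_pos, List.takeWhile_cons,
        List.dropWhile_cons,  Bool.not_true]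
      rw [ih]
      simp [hl, pvBlocks, PySem.Dict.update]
    · simp only [List.foldl_cons, pvStepA, hl, if_neg, Bool.false_eq_true,
        not_false_iff, List.takeWhile_cons, List.dropWhile_cons]
      rw [ih]
      simp [List.append_assoc]

-- A's fold before the first heading discards its accumulator, like B skipping non-heading lines
lemma pvFlush_foldl_none (lines : List String) (d : PySem.Dict String String)
    (acc : List String) :
    pvFlushA (lines.foldl pvStepA (d, none, acc)) = d.update (pvBlocks lines) := by
  induction lines generalizing acc with
  | nil => simp [pvFlushA, pvBlocks, PySem.Dict.update]
  | cons l rest ih =>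
    by_cases hl : pvIsHead l = true
    · simp only [List.foldl_cons, pvStepA, hl, if_pos]
      rw [pvFlush_foldl_some]
      simp [pvBlocks, hl]
    · simp only [List.foldl_cons, pvStepA, hl, if_neg, Bool.false_eq_true, not_false_iff]
      rw [ih]
      simp [pvBlocks, hl]

-- ===== VERDICT (by name: the statement is the Claim_ definition above) =====
theorem parse_body_sections_spec : Claim_equal_parse_body_sections := by
  intro body _
  unfold Spec_parse_body_sections parse_body_sections parse_body_sections_alt
  rw [pvFlush_foldl_none]
  simp [PySem.Dict.ofList]
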